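-- pv_equiv track=rewrite | github.com/Gosshi/gym-equipment-directory | scripts/ingest/parse_municipal_generic.py | _aggregate_raw_lines
-- ===== SOURCE A (Python) =====
-- from typing import Any
--
-- def _aggregate_raw_lines(entries: list[dict[str, Any]]) -> list[str]:
--     pairs: list[tuple[int, str]] = []
--     for entry in entries:
--         for order, line in entry.get("raw_pairs", []):
--             pairs.append((int(order), line))
--     pairs.sort(key=lambda item: item[0])
--     seen: set[str] = set()
--     ordered: list[str] = []
--     for _, line in pairs:
--         if line in seen:
--             continue
--         seen.add(line)
--         ordered.append(line)
--     return ordered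
-- ===== SOURCE B (Python) =====
-- def _aggregate_raw_lines(entries):
--     best = {}  # line -> smallest (int(order), global_index) among its occurrences
--     idx = 0
--     for entry in entries:
--         for order, line in entry.get("raw_pairs", []):
--             key = (int(order), idx)
--             cur = best.get(line)
--             if cur is None or key < cur:
--                 best[line] = key
--             idx += 1
--     return [line for line, _ in sorted(best.items(), key=lambda item: item[1])]
-- ===== Notes on version B (the rewrite author's own statement) =====
-- stated objective: alternative
-- what changed: Instead of sorting the full list of (order, line) pairs and then deduplicating with a seen-set, B makes one indexed pass building a dict from each line to the lexicographically smallest (order, global_index) among its occurrences, then sorts only the unique lines by that stored key.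
import Mathlib
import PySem

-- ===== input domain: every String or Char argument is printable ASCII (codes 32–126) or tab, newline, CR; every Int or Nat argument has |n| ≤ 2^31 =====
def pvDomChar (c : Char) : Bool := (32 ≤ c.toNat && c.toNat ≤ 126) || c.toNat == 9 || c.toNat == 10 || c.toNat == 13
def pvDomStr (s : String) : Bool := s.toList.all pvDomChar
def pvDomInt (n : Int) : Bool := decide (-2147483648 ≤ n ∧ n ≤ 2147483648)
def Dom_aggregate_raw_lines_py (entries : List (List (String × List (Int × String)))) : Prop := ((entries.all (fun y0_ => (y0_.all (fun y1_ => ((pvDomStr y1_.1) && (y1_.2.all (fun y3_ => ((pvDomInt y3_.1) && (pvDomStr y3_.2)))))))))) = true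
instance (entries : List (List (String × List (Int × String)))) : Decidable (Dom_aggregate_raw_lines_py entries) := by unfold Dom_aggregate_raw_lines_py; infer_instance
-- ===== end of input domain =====

-- B replaces "sort all pairs, then set-based dedup" by "dedup into a dict of per-line minimal
-- (order, index) keys, then sort only the unique lines" (objective: alternative decomposition).

-- ===== PORT A =====
def aggregate_raw_lines_py (entries : List (List (String × List (Int × String)))) : List String :=
  -- pairs.append((int(order), line)) — int(order) on an int is the identity
  let pairs : List (Int × String) := entries.foldl (fun acc entry =>
      (PySem.Dict.getD (PySem.Dict.mk entry) "raw_pairs" []).foldl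
        (fun acc2 p => acc2 ++ [((p.1 : Int), p.2)]) acc) []
  let pairs := PySem.List.sorted pairs (fun item => item.1) false
  let st : PySem.Set String × List String := pairs.foldl
      (fun st p => if PySem.Set.contains st.1 p.2 then st
                   else (PySem.Set.add st.1 p.2, st.2 ++ [p.2])) (PySem.Set.empty, [])
  st.2

-- ===== PORT B =====
-- one step of B's single pass: state = (best : line -> minimal (order, idx) so far, running idx)
def pvBStep (st : PySem.Dict String (Int × Int) × Int) (p : Int × String) :
    PySem.Dict String (Int × Int) × Int :=
  let key : Int × Int := ((p.1 : Int), st.2)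
  let best := match PySem.Dict.get? st.1 p.2 with
    | none => PySem.Dict.insert st.1 p.2 key
    | some cur =>
        -- Python tuple comparison `key < cur` is lexicographic; written out componentwise
        if key.1 < cur.1 ∨ (key.1 = cur.1 ∧ key.2 < cur.2) then PySem.Dict.insert st.1 p.2 key
        else st.1
  (best, st.2 + 1)

def aggregate_raw_lines_py_alt (entries : List (List (String × List (Int × String)))) : List String :=
  let st : PySem.Dict String (Int × Int) × Int := entries.foldl (fun st entry =>
      (PySem.Dict.getD (PySem.Dict.mk entry) "raw_pairs" []).foldl pvBStep st) (PySem.Dict.mk [], 0)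
  -- sorted(best.items(), key=lambda item: item[1]) — tuple key, so sorted2 on the two components
  (PySem.List.sorted2 st.1.items (fun kv => kv.2.1) (fun kv => kv.2.2) false).map (fun kv => kv.1)

-- ===== PRECONDITION & SPEC =====
def Spec_aggregate_raw_lines_py (entries : List (List (String × List (Int × String)))) (out : List String) : Prop := out = aggregate_raw_lines_py_alt entries
instance (entries : List (List (String × List (Int × String)))) (out : List String) : Decidable (Spec_aggregate_raw_lines_py entries out) := by unfold Spec_aggregate_raw_lines_py; infer_instance

-- ===== CLAIM (what is proved, stated in full; the proofs are below) =====
def Claim_equal_aggregate_raw_lines_py : Prop := ∀ (entries : List (List (String × List (Int × String)))), Dom_aggregate_raw_lines_py entries → Spec_aggregate_raw_lines_py entries (aggregate_raw_lines_py entries)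


-- ===== LEMMAS AND PROOFS =====

-- Proof-side helpers --------------------------------------------------------

-- entry.get("raw_pairs", [])
def pvRaw (e : List (String × List (Int × String))) : List (Int × String) :=
  PySem.Dict.getD (PySem.Dict.mk e) "raw_pairs" []

-- all pairs of all entries, in traversal order
def pvFlat (entries : List (List (String × List (Int × String)))) : List (Int × String) :=
  entries.flatMap pvRaw

-- the (order, global index) sort key of an enumerated pair, as a lexicographic value
def pvKey (q : Int × (Int × String)) : Lex (Int × Int) := toLex (q.2.1, q.1)

-- one step of A's seen/ordered dedup loop
def pvAStep (st : PySem.Set String × List String) (p : Int × String) :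
    PySem.Set String × List String :=
  if PySem.Set.contains st.1 p.2 then st else (PySem.Set.add st.1 p.2, st.2 ++ [p.2])

-- the lines A's dedup loop appends when started with seen-set s
def pvNews (s : PySem.Set String) : List String → List String
  | [] => []
  | x :: t => if PySem.Set.contains s x then pvNews s t else x :: pvNews (PySem.Set.add s x) t

-- the first element of each line, kept with its enumeration data
def pvFirsts (s : PySem.Set String) :
    List (Int × (Int × String)) → List (Int × (Int × String))
  | [] => []
  | q :: t => if PySem.Set.contains s q.2.2 then pvFirsts s t
              else q :: pvFirsts (PySem.Set.add s q.2.2) t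

-- v is the (order, index) of an occurrence of line l in P
def pvOcc (P : List (Int × String)) (l : String) (v : Int × Int) : Prop :=
  ∃ (k : Nat) (h : k < P.length), P[k] = (v.1, l) ∧ v.2 = (k : Int)

-- v is the lexicographically least occurrence key of line l in P
def pvMin (P : List (Int × String)) (l : String) (v : Int × Int) : Prop :=
  pvOcc P l v ∧ ∀ w, pvOcc P l w → toLex v ≤ toLex w

def pvBest (P : List (Int × String)) : PySem.Dict String (Int × Int) :=
  (P.foldl pvBStep (PySem.Dict.mk [], 0)).1

-- Generic sorting lemmas -----------------------------------------------------

theorem pvInsertBy_congr {α : Type} (b₁ b₂ : α → α → Bool) (x : α) (l : List α)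
    (h : ∀ y ∈ l, b₁ x y = b₂ x y) :
    PySem.List.insertBy b₁ x l = PySem.List.insertBy b₂ x l := by
  induction l with
  | nil => rfl
  | cons y ys ih =>
    simp only [PySem.List.insertBy, h y (by simp)]
    split
    · rfl
    · simp only [List.cons.injEq, true_and]
      exact ih (fun z hz => h z (by simp [hz]))

theorem pvInsertBy_map {α β : Type} (b : α → α → Bool) (b' : β → β → Bool) (f : α → β)
    (x : α) (l : List α) (h : ∀ a, b' (f x) (f a) = b x a) :
    PySem.List.insertBy b' (f x) (l.map f) = (PySem.List.insertBy b x l).map f := by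
  induction l with
  | nil => rfl
  | cons y ys ih =>
    simp only [List.map_cons, PySem.List.insertBy, h y]
    split
    · simp
    · simp [ih]

theorem pvSorted_map {α β κ : Type} [LinearOrder κ] (f : α → β) (key : β → κ) (l : List α) :
    PySem.List.sorted (l.map f) key false
      = (PySem.List.sorted l (fun x => key (f x)) false).map f := by
  induction l using List.reverseRecOn with
  | nil => rfl
  | append_singleton t x ih =>
    rw [PySem.List.sorted_eq_foldl_insertBy, List.map_append, List.foldl_append,
        ← PySem.List.sorted_eq_foldl_insertBy,
        PySem.List.sorted_eq_foldl_insertBy (xs := t ++ [x]), List.foldl_append,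
        ← PySem.List.sorted_eq_foldl_insertBy]
    simp only [List.map_cons, List.map_nil, List.foldl_cons, List.foldl_nil]
    rw [ih]
    exact pvInsertBy_map _ _ f x _ (fun a => rfl)

theorem pvSorted_refine {α κ κ' : Type} [LinearOrder κ] [LinearOrder κ']
    (key : α → κ) (key' : α → κ') (l : List α)
    (href : ∀ a b, key a < key b → key' a < key' b)
    (hties : l.Pairwise (fun a b => key a = key b → key' a < key' b)) :
    PySem.List.sorted l key false = PySem.List.sorted l key' false := by
  induction l using List.reverseRecOn with
  | nil => rfl
  | append_singleton t x ih =>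
    rw [List.pairwise_append] at hties
    obtain ⟨ht, -, hcross⟩ := hties
    rw [PySem.List.sorted_eq_foldl_insertBy, List.foldl_append,
        ← PySem.List.sorted_eq_foldl_insertBy,
        PySem.List.sorted_eq_foldl_insertBy (key := key'), List.foldl_append,
        ← PySem.List.sorted_eq_foldl_insertBy]
    simp only [List.foldl_cons, List.foldl_nil]
    rw [ih ht]
    apply pvInsertBy_congr
    intro y hy
    have hyt : y ∈ t := (PySem.List.mem_sorted _ _ _ _).1 hy
    have hc := hcross y hyt x (by simp)
    rcases lt_trichotomy (key x) (key y) with h | h | h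
    · simp [h, href _ _ h]
    · have := hc h.symm
      simp [h.not_lt, (lt_asymm this : ¬ key' x < key' y)]
    · have := href _ _ h
      simp [(lt_asymm h : ¬ key x < key y), (lt_asymm this : ¬ key' x < key' y)]

theorem pvSorted2_toLex {α : Type} (l : List α) (k1 k2 : α → Int) :
    PySem.List.sorted2 l k1 k2 false
      = PySem.List.sorted l (fun x => toLex (k1 x, k2 x)) false := by
  show l.foldl _ [] = l.foldl _ []
  congr 1
  funext acc x
  apply pvInsertBy_congr
  intro y _
  simp only [Prod.Lex.toLex_lt_toLex]
  by_cases h1 : k1 x < k1 y <;> by_cases h2 : k1 y < k1 x <;> by_cases h3 : k2 x < k2 y <;>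
    simp [h1, h2, h3] <;> omega

-- A-side reductions ----------------------------------------------------------

theorem pvUpdate_eq_append_news (xs : List String) (s : PySem.Set String) :
    PySem.Set.update s xs = s ++ pvNews s xs := by
  induction xs generalizing s with
  | nil => simp [PySem.Set.update_nil, pvNews]
  | cons x t ih =>
    rw [PySem.Set.update_cons, pvNews]
    by_cases hx : x ∈ s
    · rw [PySem.Set.add_of_mem hx, if_pos (by simpa [PySem.Set.contains_iff] using hx), ih]
    · rw [if_neg (by simpa [PySem.Set.contains_iff] using hx), ih,
          PySem.Set.add_of_not_mem hx, List.append_assoc, List.singleton_append]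

theorem pvFoldA (l : List (Int × String)) (s : PySem.Set String) (o : List String) :
    l.foldl pvAStep (s, o) = (PySem.Set.update s (l.map (·.2)), o ++ pvNews s (l.map (·.2))) := by
  induction l generalizing s o with
  | nil => simp [PySem.Set.update_nil, pvNews]
  | cons p t ih =>
    simp only [List.foldl_cons, List.map_cons, PySem.Set.update_cons, pvNews, pvAStep]
    by_cases hc : PySem.Set.contains s p.2
    · rw [if_pos hc, if_pos hc, ih,
          PySem.Set.add_of_mem (by simpa [PySem.Set.contains_iff] using hc)]
    · rw [if_neg hc, if_neg hc, ih]
      simp [List.append_assoc]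

theorem pvA_eq (entries : List (List (String × List (Int × String)))) :
    aggregate_raw_lines_py entries
      = PySem.Set.ofList ((PySem.List.sorted (pvFlat entries) (fun it => it.1) false).map (·.2)) := by
  show (((PySem.List.sorted (entries.foldl (fun acc entry =>
      (pvRaw entry).foldl (fun acc2 p => acc2 ++ [(p.1, p.2)]) acc) []) (fun it => it.1) false).foldl
      pvAStep (PySem.Set.empty, [])).2) = _
  have h1 : entries.foldl (fun acc entry =>
      (pvRaw entry).foldl (fun acc2 p => acc2 ++ [(p.1, p.2)]) acc) [] = pvFlat entries := by
    have h2 : ∀ (e : List (Int × String)) (acc : List (Int × String)),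
        e.foldl (fun acc2 p => acc2 ++ [(p.1, p.2)]) acc = acc ++ e := by
      intro e acc
      have : (fun (acc2 : List (Int × String)) (p : Int × String) => acc2 ++ [(p.1, p.2)])
          = fun acc2 p => acc2 ++ [p] := by funext acc2 p; simp
      rw [this, PySem.List.foldl_append_singleton_eq_self]
    calc entries.foldl (fun acc entry =>
          (pvRaw entry).foldl (fun acc2 p => acc2 ++ [(p.1, p.2)]) acc) []
        = entries.foldl (fun acc entry => acc ++ pvRaw entry) [] := by
          apply PySem.List.foldl_congr_mem
          intro acc e _
          exact h2 (pvRaw e) acc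
      _ = pvFlat entries := by rw [PySem.List.foldl_append_eq_flatMap]; rfl
  rw [h1, pvFoldA]
  show pvNews [] _ = _
  have h3 := pvUpdate_eq_append_news
    ((PySem.List.sorted (pvFlat entries) (fun it => it.1) false).map (·.2)) []
  rw [List.nil_append] at h3
  rw [← h3]
  rfl

-- stability chain: sorting the pairs by order only = sorting the enumerated
-- pairs by (order, index) and forgetting the index
theorem pvSorted_fst_eq (P : List (Int × String)) :
    PySem.List.sorted P (fun it => it.1) false
      = (PySem.List.sorted (PySem.List.enumerate P 0) pvKey false).map (·.2) := by
  conv_lhs => rw [← PySem.List.map_snd_enumerate P 0]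
  rw [pvSorted_map (fun q => q.2) (fun it => it.1) (PySem.List.enumerate P 0)]
  congr 1
  apply pvSorted_refine
  · intro a b hab
    exact Prod.Lex.toLex_lt_toLex.mpr (Or.inl hab)
  · apply (PySem.List.pairwise_lt_enumerate P 0).imp
    intro a b hab heq
    exact Prod.Lex.toLex_lt_toLex.mpr (Or.inr ⟨heq, hab⟩)

-- B-side reductions ----------------------------------------------------------

theorem pvB_eq (entries : List (List (String × List (Int × String)))) :
    aggregate_raw_lines_py_alt entries
      = (PySem.List.sorted (pvBest (pvFlat entries)).items (fun kv => toLex kv.2) false).map (·.1) := by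
  show (PySem.List.sorted2 ((entries.foldl (fun st entry =>
      (pvRaw entry).foldl pvBStep st) (PySem.Dict.mk [], 0)).1.items)
      (fun kv => kv.2.1) (fun kv => kv.2.2) false).map (fun kv => kv.1) = _
  have h1 : ∀ (es : List (List (String × List (Int × String))))
      (st : PySem.Dict String (Int × Int) × Int),
      es.foldl (fun st entry => (pvRaw entry).foldl pvBStep st) st
        = (pvFlat es).foldl pvBStep st := by
    intro es
    induction es with
    | nil => intro st; rfl
    | cons e t ih =>
      intro st
      show t.foldl _ ((pvRaw e).foldl pvBStep st) = _
      rw [ih]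
      show _ = ((e :: t).flatMap pvRaw).foldl pvBStep st
      rw [List.flatMap_cons, List.foldl_append]
      rfl
  rw [h1, pvSorted2_toLex]
  show (PySem.List.sorted (pvBest (pvFlat entries)).items
      (fun kv => toLex (kv.2.1, kv.2.2)) false).map (fun kv => kv.1) = _
  rfl

theorem pvBest_snd (P : List (Int × String)) (d : PySem.Dict String (Int × Int)) (i : Int) :
    (P.foldl pvBStep (d, i)).2 = i + P.length := by
  induction P generalizing d i with
  | nil => simp
  | cons p t ih =>
    show (t.foldl pvBStep (pvBStep (d, i) p)).2 = _
    have : pvBStep (d, i) p = ((pvBStep (d, i) p).1, i + 1) := by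
      simp [pvBStep]
    rw [this, ih]
    simp
    ring

theorem pvBest_keys_nodup (P : List (Int × String)) (d : PySem.Dict String (Int × Int)) (i : Int)
    (h : d.keys.Nodup) : ((P.foldl pvBStep (d, i)).1).keys.Nodup := by
  induction P generalizing d i with
  | nil => exact h
  | cons p t ih =>
    show ((t.foldl pvBStep (pvBStep (d, i) p)).1).keys.Nodup
    have hstep : pvBStep (d, i) p = ((pvBStep (d, i) p).1, i + 1) := by simp [pvBStep]
    rw [hstep]
    apply ih
    simp only [pvBStep]
    rcases hg : PySem.Dict.get? d p.2 with _ | cur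
    · simpa using PySem.Dict.nodup_keys_insert d p.2 _ h
    · by_cases hcnd : p.1 < cur.1 ∨ p.1 = cur.1 ∧ i < cur.2
      · simpa [hcnd] using PySem.Dict.nodup_keys_insert d p.2 (p.1, i) h
      · simpa [hcnd] using h

theorem pvMin_unique (P : List (Int × String)) (l : String) (v w : Int × Int)
    (hv : pvMin P l v) (hw : pvMin P l w) : v = w := by
  have h1 := hv.2 w hw.1
  have h2 := hw.2 v hv.1
  exact toLex.injective (le_antisymm h1 h2)

theorem pvBest_append (P : List (Int × String)) (x : Int × String) :
    pvBest (P ++ [x]) = (pvBStep (pvBest P, (P.length : Int)) x).1 := by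
  unfold pvBest
  rw [List.foldl_append]
  have h : P.foldl pvBStep (PySem.Dict.mk [], 0) = (pvBest P, (P.length : Int)) := by
    have h2 := pvBest_snd P (PySem.Dict.mk []) 0
    rw [zero_add] at h2
    exact Prod.ext rfl h2
  rw [h]
  rfl

theorem pvOcc_append (P : List (Int × String)) (x : Int × String) (l : String) (v : Int × Int) :
    pvOcc (P ++ [x]) l v ↔ pvOcc P l v ∨ (x = (v.1, l) ∧ v.2 = (P.length : Int)) := by
  unfold pvOcc
  constructor
  · rintro ⟨k, hk, hPk, hv2⟩
    rw [List.length_append, List.length_singleton] at hk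
    by_cases hkP : k < P.length
    · exact Or.inl ⟨k, hkP, by rwa [List.getElem_append_left hkP] at hPk, hv2⟩
    · have hkeq : k = P.length := by omega
      subst hkeq
      rw [List.getElem_concat_length rfl] at hPk
      exact Or.inr ⟨hPk, hv2⟩
  · rintro (⟨k, hk, hPk, hv2⟩ | ⟨hx, hv2⟩)
    · refine ⟨k, by simp; omega, ?_, hv2⟩
      rwa [List.getElem_append_left hk]
    · refine ⟨P.length, by simp, ?_, hv2⟩
      rw [List.getElem_concat_length rfl]
      exact hx

theorem pvMin_append_of_ne (P : List (Int × String)) (x : Int × String) (l : String)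
    (v : Int × Int) (hne : l ≠ x.2) : pvMin (P ++ [x]) l v ↔ pvMin P l v := by
  have hocc : ∀ w, pvOcc (P ++ [x]) l w ↔ pvOcc P l w := by
    intro w
    rw [pvOcc_append]
    constructor
    · rintro (h | ⟨hx, -⟩)
      · exact h
      · exact absurd (congrArg Prod.snd hx).symm hne
    · exact Or.inl
  unfold pvMin
  rw [hocc]
  exact and_congr_right fun _ => forall_congr' fun w => by rw [hocc]

theorem pvMin_iff_eq (P : List (Int × String)) (l : String) (v v0 : Int × Int)
    (h0 : pvMin P l v0) : pvMin P l v ↔ v = v0 := by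
  constructor
  · intro h
    exact pvMin_unique P l v v0 h h0
  · rintro rfl
    exact h0

theorem pvBest_keys_nodup' (P : List (Int × String)) : (pvBest P).keys.Nodup := by
  apply pvBest_keys_nodup
  simp [PySem.Dict.keys]

theorem pvMin_exists (P : List (Int × String)) (l : String) :
    (∃ w, pvOcc P l w) → ∃ v, pvMin P l v := by
  induction P using List.reverseRecOn with
  | nil =>
    rintro ⟨w, k, hk, -⟩
    simp at hk
  | append_singleton P x ih =>
    rintro ⟨w, hw⟩
    by_cases hxl : x.2 = l
    · have hnew : pvOcc (P ++ [x]) l (x.1, (P.length : Int)) :=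
        (pvOcc_append P x l _).mpr (Or.inr ⟨Prod.ext rfl hxl, rfl⟩)
      by_cases hocc : ∃ w, pvOcc P l w
      · obtain ⟨v, hv⟩ := ih hocc
        rcases le_total (toLex v) (toLex (x.1, (P.length : Int))) with hle | hle
        · refine ⟨v, (pvOcc_append P x l v).mpr (Or.inl hv.1), ?_⟩
          intro u hu
          rcases (pvOcc_append P x l u).mp hu with hu | ⟨hu1, hu2⟩
          · exact hv.2 u hu
          · have : u = (x.1, (P.length : Int)) :=
              Prod.ext (congrArg Prod.fst hu1).symm hu2
            rw [this]
            exact hle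
        · refine ⟨(x.1, (P.length : Int)), hnew, ?_⟩
          intro u hu
          rcases (pvOcc_append P x l u).mp hu with hu | ⟨hu1, hu2⟩
          · exact le_trans hle (hv.2 u hu)
          · have : u = (x.1, (P.length : Int)) :=
              Prod.ext (congrArg Prod.fst hu1).symm hu2
            rw [this]
      · refine ⟨(x.1, (P.length : Int)), hnew, ?_⟩
        intro u hu
        rcases (pvOcc_append P x l u).mp hu with hu | ⟨hu1, hu2⟩
        · exact absurd ⟨u, hu⟩ hocc
        · have : u = (x.1, (P.length : Int)) :=
            Prod.ext (congrArg Prod.fst hu1).symm hu2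
          rw [this]
    · have hl : l ≠ x.2 := fun h => hxl h.symm
      have hocc : ∃ w, pvOcc P l w := by
        rcases (pvOcc_append P x l w).mp hw with hu | ⟨hu1, -⟩
        · exact ⟨w, hu⟩
        · exact absurd (congrArg Prod.snd hu1).symm hl
      obtain ⟨v, hv⟩ := ih hocc
      exact ⟨v, (pvMin_append_of_ne P x l v hl).mpr hv⟩

theorem pvBest_mem (P : List (Int × String)) :
    ∀ (l : String) (v : Int × Int), (l, v) ∈ (pvBest P).items ↔ pvMin P l v := by
  induction P using List.reverseRecOn with
  | nil =>
    intro l v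
    constructor
    · intro h
      simp [pvBest] at h
    · rintro ⟨⟨k, hk, -⟩, -⟩
      simp at hk
  | append_singleton P x ih =>
    intro l v
    rw [pvBest_append]
    have hnd := pvBest_keys_nodup' P
    have hkeys : ∀ l', l' ∈ (pvBest P).keys ↔ ∃ v', pvOcc P l' v' := by
      intro l'
      constructor
      · intro h
        simp only [PySem.Dict.keys, List.mem_map] at h
        obtain ⟨p, hp, hp1⟩ := h
        have : (l', p.2) ∈ (pvBest P).items := by
          rwa [show (l', p.2) = p from Prod.ext hp1.symm rfl]
        exact ⟨p.2, ((ih l' p.2).mp this).1⟩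
      · intro h
        obtain ⟨v', hv'⟩ := pvMin_exists P l' h
        exact List.mem_map.mpr ⟨(l', v'), (ih l' v').mpr hv', rfl⟩
    rcases hg : PySem.Dict.get? (pvBest P) x.2 with _ | cur
    · -- line x.2 never seen before: the new key/value pair is appended
      have hnocc : ¬ ∃ w, pvOcc P x.2 w := by
        intro h
        exact absurd ((hkeys x.2).mpr h)
          ((PySem.Dict.get?_eq_none_iff_not_mem_keys (pvBest P) x.2).mp hg)
      simp only [pvBStep, hg]
      rw [PySem.Dict.mem_items_insert]
      by_cases hl : l = x.2
      · subst hl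
        have hocc_iff : ∀ w, pvOcc (P ++ [x]) x.2 w ↔ w = (x.1, (P.length : Int)) := by
          intro w
          rw [pvOcc_append]
          constructor
          · rintro (h | ⟨h1, h2⟩)
            · exact absurd ⟨w, h⟩ hnocc
            · exact Prod.ext (congrArg Prod.fst h1).symm h2
          · rintro rfl
            exact Or.inr ⟨Prod.ext rfl rfl, rfl⟩
        constructor
        · rintro (h | ⟨-, h2⟩)
          · have hv : v = (x.1, (P.length : Int)) := (Prod.ext_iff.mp h).2
            refine ⟨(hocc_iff v).mpr hv, fun w hw => ?_⟩
            rw [hocc_iff w] at hw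
            rw [hv, hw]
          · exact absurd rfl h2
        · rintro ⟨h1, -⟩
          exact Or.inl (by rw [(hocc_iff v).mp h1])
      · rw [pvMin_append_of_ne P x l v (by exact hl)]
        constructor
        · rintro (h | ⟨h1, -⟩)
          · exact absurd (Prod.ext_iff.mp h).1 hl
          · exact (ih l v).mp h1
        · intro h
          exact Or.inr ⟨(ih l v).mpr h, hl⟩
    · -- line x.2 already has a stored minimum cur
      have hcur : pvMin P x.2 cur :=
        (ih x.2 cur).mp (PySem.Dict.mem_items_of_get?_eq_some _ hg)
      simp only [pvBStep, hg]
      split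
      · rename_i hlt
        have hlt' : toLex ((x.1 : Int), (P.length : Int)) < toLex cur := by
          rw [show cur = (cur.1, cur.2) from rfl]
          exact Prod.Lex.toLex_lt_toLex.mpr hlt
        rw [PySem.Dict.mem_items_insert]
        by_cases hl : l = x.2
        · subst hl
          have hmin : pvMin (P ++ [x]) x.2 (x.1, (P.length : Int)) := by
            refine ⟨(pvOcc_append P x x.2 _).mpr (Or.inr ⟨Prod.ext rfl rfl, rfl⟩), ?_⟩
            intro w hw
            rcases (pvOcc_append P x x.2 w).mp hw with h | ⟨h1, h2⟩
            · exact le_trans (le_of_lt hlt') (hcur.2 w h)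
            · have hw2 : w = (x.1, (P.length : Int)) := Prod.ext (by rw [h1]) h2
              rw [hw2]
          rw [pvMin_iff_eq (P ++ [x]) x.2 v _ hmin]
          constructor
          · rintro (h | ⟨-, h2⟩)
            · exact (Prod.ext_iff.mp h).2
            · exact absurd rfl h2
          · rintro rfl
            exact Or.inl rfl
        · rw [pvMin_append_of_ne P x l v (by exact hl)]
          constructor
          · rintro (h | ⟨h1, -⟩)
            · exact absurd (Prod.ext_iff.mp h).1 hl
            · exact (ih l v).mp h1
          · intro h
            exact Or.inr ⟨(ih l v).mpr h, hl⟩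
      · rename_i hnlt
        by_cases hl : l = x.2
        · subst hl
          have hle : toLex cur ≤ toLex ((x.1 : Int), (P.length : Int)) := by
            rcases le_total (toLex cur) (toLex ((x.1 : Int), (P.length : Int))) with h | h
            · exact h
            · rcases lt_or_eq_of_le h with h | h
              · exact absurd (Prod.Lex.toLex_lt_toLex.mp
                  (by rw [show cur = (cur.1, cur.2) from rfl] at h; exact h)) hnlt
              · exact le_of_eq h.symm
          have hmin : pvMin (P ++ [x]) x.2 cur := by
            refine ⟨(pvOcc_append P x x.2 cur).mpr (Or.inl hcur.1), ?_⟩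
            intro w hw
            rcases (pvOcc_append P x x.2 w).mp hw with h | ⟨h1, h2⟩
            · exact hcur.2 w h
            · have hw2 : w = (x.1, (P.length : Int)) := Prod.ext (by rw [h1]) h2
              rw [hw2]
              exact hle
          rw [pvMin_iff_eq (P ++ [x]) x.2 v _ hmin,
              ← PySem.Dict.get?_eq_some_iff_mem_items (pvBest P) x.2 v hnd, hg,
              Option.some_inj]
          exact eq_comm
        · rw [pvMin_append_of_ne P x l v (by exact hl)]
          exact ih l v

-- firsts lemmas --------------------------------------------------------------

theorem pvFirsts_map (s : PySem.Set String) (R : List (Int × (Int × String))) :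
    (pvFirsts s R).map (·.2.2) = pvNews s (R.map (·.2.2)) := by
  induction R generalizing s with
  | nil => rfl
  | cons q t ih =>
    simp only [pvFirsts, List.map_cons, pvNews]
    split
    · exact ih s
    · simp [ih]

theorem pvFirsts_sublist (s : PySem.Set String) (R : List (Int × (Int × String))) :
    (pvFirsts s R).Sublist R := by
  induction R generalizing s with
  | nil => simp [pvFirsts]
  | cons q t ih =>
    simp only [pvFirsts]
    split
    · exact (ih s).cons q
    · exact (ih _).cons₂ q

theorem pvFirsts_lines_nodup (s : PySem.Set String) (R : List (Int × (Int × String))) :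
    ((pvFirsts s R).map (·.2.2)).Nodup ∧ ∀ x ∈ (pvFirsts s R).map (·.2.2), x ∉ s := by
  induction R generalizing s with
  | nil => simp [pvFirsts]
  | cons q t ih =>
    simp only [pvFirsts]
    split
    · exact ih s
    · rename_i hc
      obtain ⟨hnd, hout⟩ := ih (PySem.Set.add s q.2.2)
      refine ⟨?_, ?_⟩
      · simp only [List.map_cons, List.nodup_cons]
        refine ⟨fun hmem => ?_, hnd⟩
        have := hout _ hmem
        simp [PySem.Set.mem_add] at this
      · intro x hx
        simp only [List.map_cons, List.mem_cons] at hx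
        rcases hx with rfl | hx
        · intro hmem
          exact absurd ((PySem.Set.contains_iff _ _).mpr hmem) (by simpa using hc)
        · intro hmem
          exact hout x hx (by simp [PySem.Set.mem_add, hmem])

theorem pvMem_firsts (R : List (Int × (Int × String)))
    (hR : R.Pairwise (fun a b => pvKey a < pvKey b)) :
    ∀ (s : PySem.Set String) (q : Int × (Int × String)),
    q ∈ pvFirsts s R ↔ q ∈ R ∧ q.2.2 ∉ s ∧ ∀ r ∈ R, r.2.2 = q.2.2 → pvKey q ≤ pvKey r := by
  induction R with
  | nil => simp [pvFirsts]
  | cons a t ih =>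
    have hat := List.pairwise_cons.mp hR
    intro s q
    simp only [pvFirsts]
    split
    · rename_i hc
      have ha : a.2.2 ∈ s := (PySem.Set.contains_iff _ _).mp hc
      rw [ih hat.2 s q]
      constructor
      · rintro ⟨hqt, hqs, hmin⟩
        refine ⟨List.mem_cons_of_mem a hqt, hqs, ?_⟩
        intro r hr hline
        rcases List.mem_cons.mp hr with rfl | hrt
        · exact absurd (hline ▸ ha) hqs
        · exact hmin r hrt hline
      · rintro ⟨hq, hqs, hmin⟩
        rcases List.mem_cons.mp hq with rfl | hqt
        · exact absurd ha hqs
        · exact ⟨hqt, hqs, fun r hr hline => hmin r (List.mem_cons_of_mem a hr) hline⟩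
    · rename_i hc
      have ha : a.2.2 ∉ s := fun hm => hc (by simpa using (PySem.Set.contains_iff _ _).mpr hm)
      simp only [List.mem_cons]
      constructor
      · rintro (rfl | hq)
        · exact ⟨Or.inl rfl, ha, by
            rintro r hr hline
            rcases hr with rfl | hrt
            · exact le_refl _
            · exact le_of_lt (hat.1 r hrt)⟩
        · obtain ⟨hqt, hqs, hmin⟩ := (ih hat.2 _ q).mp hq
          rw [PySem.Set.mem_add, not_or] at hqs
          refine ⟨Or.inr hqt, hqs.1, ?_⟩
          intro r hr hline
          rcases hr with rfl | hrt
          · exact absurd hline.symm hqs.2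
          · exact hmin r hrt hline
      · rintro ⟨hq, hqs, hmin⟩
        rcases hq with rfl | hqt
        · exact Or.inl rfl
        · right
          rw [ih hat.2 _ q]
          refine ⟨hqt, ?_, fun r hr hline => hmin r (Or.inr hr) hline⟩
          rw [PySem.Set.mem_add, not_or]
          refine ⟨hqs, fun hline => ?_⟩
          have hlt := hat.1 q hqt
          have hle := hmin a (Or.inl rfl) hline.symm
          exact absurd hlt (not_lt.mpr hle)

-- R facts --------------------------------------------------------------------

theorem pvR_pairwise_lt (P : List (Int × String)) :
    (PySem.List.sorted (PySem.List.enumerate P 0) pvKey false).Pairwise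
      (fun a b => pvKey a < pvKey b) := by
  have hle : (PySem.List.sorted (PySem.List.enumerate P 0) pvKey false).Pairwise
      (fun a b => pvKey a ≤ pvKey b) := PySem.List.sorted_pairwise _ _
  have hne : (PySem.List.sorted (PySem.List.enumerate P 0) pvKey false).Pairwise
      (fun a b => a.1 ≠ b.1) := by
    have h0 : (PySem.List.enumerate P 0).Pairwise (fun a b => a.1 ≠ b.1) :=
      (PySem.List.pairwise_lt_enumerate P 0).imp (fun h => ne_of_lt h)
    exact ((PySem.List.sorted_perm (PySem.List.enumerate P 0) pvKey false).pairwise_iff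
      (fun h => (Ne.symm h))).mpr h0
  apply (hle.and hne).imp
  rintro a b ⟨h1, h2⟩
  apply lt_of_le_of_ne h1
  intro heq
  apply h2
  have := toLex.injective heq
  have : (a.2.1, a.1) = (b.2.1, b.1) := this
  exact (Prod.ext_iff.mp this).2

-- the core equality, for an arbitrary flat pair list P -----------------------

theorem pvCore (P : List (Int × String)) :
    PySem.Set.ofList ((PySem.List.sorted P (fun it => it.1) false).map (·.2))
      = (PySem.List.sorted (pvBest P).items (fun kv => toLex kv.2) false).map (·.1) := by
  set R := PySem.List.sorted (PySem.List.enumerate P 0) pvKey false with hRdef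
  have hRpw : R.Pairwise (fun a b => pvKey a < pvKey b) := pvR_pairwise_lt P
  have hmemR : ∀ q, q ∈ R ↔ ∃ (k : Nat) (h : k < P.length), q = ((k : Int), P[k]) := by
    intro q
    rw [hRdef, PySem.List.mem_sorted, PySem.List.mem_enumerate_iff]
    constructor
    · rintro ⟨k, hk, hq⟩
      exact ⟨k, hk, by simpa using hq⟩
    · rintro ⟨k, hk, hq⟩
      exact ⟨k, hk, by simpa using hq⟩
  -- the A side is the lines of the first-occurrence list of R
  have hA : PySem.Set.ofList ((PySem.List.sorted P (fun it => it.1) false).map (·.2))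
      = (pvFirsts [] R).map (·.2.2) := by
    rw [pvSorted_fst_eq, List.map_map]
    have h1 : PySem.Set.ofList (R.map (fun q => q.2.2)) = pvNews [] (R.map (fun q => q.2.2)) := by
      have h2 := pvUpdate_eq_append_news (R.map (fun q => q.2.2)) []
      rw [List.nil_append] at h2
      rw [← h2]
      rfl
    rw [show ((·.2) ∘ (·.2) : Int × (Int × String) → String) = fun q => q.2.2 from rfl, h1,
        ← pvFirsts_map]
  -- the B side: name the sorted order of the dict items
  have hB : PySem.List.sorted (pvBest P).items (fun kv => toLex kv.2) false
      = (pvFirsts [] R).map (fun q => (q.2.2, (q.2.1, q.1))) := by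
    apply PySem.List.sorted_eq_of_perm_of_pairwise_lt
    · -- the mapped firsts list is a permutation of the dict items
      have hndys : ((pvFirsts [] R).map (fun q => (q.2.2, (q.2.1, q.1)))).Nodup := by
        apply List.Nodup.of_map (f := fun p => p.1)
        rw [List.map_map]
        exact (pvFirsts_lines_nodup [] R).1
      have hnditems : (pvBest P).items.Nodup := by
        apply List.Nodup.of_map (f := fun p => p.1)
        exact pvBest_keys_nodup' P
      rw [List.perm_ext_iff_of_nodup hndys hnditems]
      rintro ⟨l, v⟩
      rw [pvBest_mem P l v, List.mem_map]
      constructor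
      · rintro ⟨q, hq, hmap⟩
        obtain ⟨hqR, -, hqmin⟩ := (pvMem_firsts R hRpw [] q).mp hq
        obtain ⟨k, hk, hqk⟩ := (hmemR q).mp hqR
        rw [Prod.mk.injEq] at hmap
        obtain ⟨h1, h2⟩ := hmap
        have hl : l = P[k].2 := by rw [← h1, hqk]
        have hv : v = (P[k].1, (k : Int)) := by rw [← h2, hqk]
        constructor
        · exact ⟨k, hk, by rw [hv, hl], by rw [hv]⟩
        · intro w hw
          obtain ⟨k', hk', hPk', hw2⟩ := hw
          have hrR : ((k' : Int), P[k']) ∈ R := (hmemR _).mpr ⟨k', hk', rfl⟩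
          have hrl : (((k' : Int), P[k']) : Int × (Int × String)).2.2 = q.2.2 := by
            show P[k'].2 = q.2.2
            rw [hPk', hqk]
            exact hl
          have h5 := hqmin _ hrR hrl
          unfold pvKey at h5
          rw [hqk] at h5
          have h6 : toLex v ≤ toLex (P[k'].1, (k' : Int)) := by
            rw [hv]
            exact h5
          have h7 : toLex w = toLex (P[k'].1, (k' : Int)) := by
            rw [show w = (P[k'].1, (k' : Int)) from Prod.ext (by rw [hPk']) hw2]
          rw [← h7] at h6
          exact h6
      · rintro ⟨⟨k, hk, hPk, hv2⟩, hmin⟩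
        have hvP : v = (P[k].1, (k : Int)) := Prod.ext (by rw [hPk]) hv2
        have hlP : P[k].2 = l := by rw [hPk]
        refine ⟨((k : Int), P[k]), ?_, ?_⟩
        · rw [pvMem_firsts R hRpw []]
          refine ⟨(hmemR _).mpr ⟨k, hk, rfl⟩, by simp, ?_⟩
          intro r hrR hrl
          obtain ⟨k', hk', hrk⟩ := (hmemR r).mp hrR
          have hocc' : pvOcc P l (P[k'].1, (k' : Int)) := by
            refine ⟨k', hk', Prod.ext rfl ?_, rfl⟩
            show P[k'].2 = l
            have h3 : r.2.2 = P[k'].2 := by rw [hrk]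
            rw [← h3, hrl]
            exact hlP
          have h4 := hmin _ hocc'
          show pvKey ((k : Int), P[k]) ≤ pvKey r
          unfold pvKey
          rw [hrk]
          show toLex (P[k].1, (k : Int)) ≤ toLex (P[k'].1, (k' : Int))
          rw [← hvP]
          exact h4
        · exact Prod.ext hlP hvP.symm
    · -- strictly increasing keys on the firsts list
      rw [List.pairwise_map]
      exact (hRpw.sublist (pvFirsts_sublist [] R)).imp (fun h => h)
  rw [hA, hB, List.map_map]
  rfl


-- ===== VERDICT (by name: the statement is the Claim_ definition above) =====
theorem aggregate_raw_lines_py_spec : Claim_equal_aggregate_raw_lines_py := by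
  intro entries _
  show aggregate_raw_lines_py entries = aggregate_raw_lines_py_alt entries
  rw [pvA_eq, pvB_eq, pvCore]
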